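-- pv_equiv track=rewrite | github.com/VladislavBannikov/py-adv_2.2.Regexp | main.py | merge_duplicates
-- ===== SOURCE A (Python) =====
-- def merge_duplicates(contacts):
--     """
--     Merge duplicate contacts automatically by simple logic.
--     Function compares contacts by last name.
--     Manual review of conflicts not implemented! Proper data can be lost!
--     :param contacts:
--     :return:
--     """
--     last_names = dict()  # dict contains list of indexes of contacts with the same last name. Key is last name
--     for i in range(len(contacts)):  # fill in last_name dict
--         name = contacts[i][0]
--         if name in last_names.keys():
--             last_names[name].append(i)
--         else:
--             last_names[name] = [i]
--     ref_contacts = []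
--     for i in range(len(contacts)):  # merge duplicates.
--         name = contacts[i][0]
--         if len(last_names.get(name)) > 1:
--             dups = [contacts[j] for j in last_names.get(name)]
--             ref_contacts.append([next((d for d in di if d), '') for di in zip(*dups)])
--             last_names[name] = []
--         elif len(last_names.get(name)) == 1:
--             ref_contacts.append(contacts[i])
--     return ref_contacts
-- ===== SOURCE B (Python) =====
-- def merge_duplicates(contacts):
--     """One pass: fold each contact element-wise into the record stored under its last name."""
--     acc = {}
--     for c in contacts:
--         name = c[0]
--         if name in acc:
--             acc[name] = [a if a else b for a, b in zip(acc[name], c)]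
--         else:
--             acc[name] = c
--     return list(acc.values())
-- ===== Notes on version B (the rewrite author's own statement) =====
-- stated objective: simpler
-- what changed: Single pass that merges duplicates incrementally: each contact is folded element-wise into the record already stored under its last name (first non-empty field wins, zip of just two rows), so A's index dict, group lists, zip(*dups) column pass, sentinel-emptying trick and second full scan all disappear; the result is simply the dict's values.
import Mathlib
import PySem

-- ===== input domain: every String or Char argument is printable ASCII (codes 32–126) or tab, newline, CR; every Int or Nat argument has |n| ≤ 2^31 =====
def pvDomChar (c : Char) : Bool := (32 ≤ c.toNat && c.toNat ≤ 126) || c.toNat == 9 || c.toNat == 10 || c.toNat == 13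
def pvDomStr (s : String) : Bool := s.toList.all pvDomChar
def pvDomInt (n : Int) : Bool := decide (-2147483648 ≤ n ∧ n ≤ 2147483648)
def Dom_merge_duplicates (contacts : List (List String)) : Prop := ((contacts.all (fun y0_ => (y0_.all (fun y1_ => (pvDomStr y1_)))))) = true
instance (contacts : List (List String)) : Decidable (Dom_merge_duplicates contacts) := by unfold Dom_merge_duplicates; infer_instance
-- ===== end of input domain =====

-- B replaces A's two index-based passes (index dict + second scan with sentinel-emptying skip)
-- by ONE pass that folds each contact element-wise into the record stored under its last name: simpler.


-- ===== PORT A =====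
-- c[0] (valid under Pre_, which excludes empty contact records)
def pvHead (c : List String) : String := PySem.List.pyGetD c 0 ""

-- next((d for d in di if d), '')  (first truthy string, else '')
def firstTruthy : List String → String
  | [] => ""
  | d :: rest => if d ≠ "" then d else firstTruthy rest

-- zip(*rows): list of columns, truncated at the shortest row (exact; rows are nonempty where used)
def pyZipStar (rows : List (List String)) : List (List String) :=
  match rows with
  | [] => []
  | r :: rs =>
      (List.range (rs.foldl (fun m l => min m l.length) r.length)).map
        (fun k => (r :: rs).map (fun l => l.getD k ""))

def merge_duplicates (contacts : List (List String)) : List (List String) :=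
  let last_names := (List.range contacts.length).foldl
    (fun d i =>
      let name := pvHead (contacts.getD i [])
      if (d.get? name).isSome then d.modify name [] (fun l => l ++ [i])
      else d.insert name [i])
    PySem.Dict.empty
  ((List.range contacts.length).foldl
    (fun st i =>
      let name := pvHead (contacts.getD i [])
      let g := st.1.getD name []
      if 1 < g.length then
        let dups := g.map (fun j => contacts.getD j [])
        (st.1.insert name [], st.2 ++ [(pyZipStar dups).map firstTruthy])
      else if g.length = 1 then (st.1, st.2 ++ [contacts.getD i []])
      else st)
    (last_names, ([] : List (List String)))).2

-- ===== PORT B =====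
-- [a if a else b for a, b in zip(r, c)]
def mergeTwo (r c : List String) : List String :=
  (r.zip c).map (fun p => if p.1 ≠ "" then p.1 else p.2)

-- the record stored for c's last name: merged into the existing one, or c itself if new
def pvStep (d : PySem.Dict String (List String)) (c : List String) : List String :=
  match d.get? (pvHead c) with
  | some r => mergeTwo r c
  | none => c

def merge_duplicates_alt (contacts : List (List String)) : List (List String) :=
  (contacts.foldl
    (fun d c => d.insert (pvHead c) (pvStep d c))
    PySem.Dict.empty).values

-- ===== PRECONDITION & SPEC =====
-- Pre_ excludes inputs in which some contact record has no fields: there Python A raises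
-- IndexError at contacts[i][0] (and B raises at c[0] too), so A returns no value.
def Pre_merge_duplicates (contacts : List (List String)) : Prop := [] ∉ contacts
instance (contacts : List (List String)) : Decidable (Pre_merge_duplicates contacts) := by
  unfold Pre_merge_duplicates; infer_instance

def pvWitness_merge_duplicates : List (List String) :=
  [["a", "1", ""], ["b", "5"], ["a", "", "3"]]

def Spec_merge_duplicates (contacts : List (List String)) (out : List (List String)) : Prop := out = merge_duplicates_alt contacts
instance (contacts : List (List String)) (out : List (List String)) : Decidable (Spec_merge_duplicates contacts out) := by unfold Spec_merge_duplicates; infer_instance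

-- ===== CLAIM (what is proved, stated in full; the proofs are below) =====
def Claim_equal_merge_duplicates : Prop := ∀ (contacts : List (List String)), Dom_merge_duplicates contacts → Pre_merge_duplicates contacts → Spec_merge_duplicates contacts (merge_duplicates contacts)

-- ===== LEMMAS AND PROOFS =====

-- head of the i-th contact
def pvHd (contacts : List (List String)) (i : Nat) : String := pvHead (contacts.getD i [])

-- indices of the contacts whose last name is `name` (A's last_names[name])
def pvI (contacts : List (List String)) (name : String) : List Nat :=
  (List.range contacts.length).filter (fun i => pvHd contacts i == name)

-- the record the output carries for one group
def pvRec (g : List (List String)) : List String :=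
  if 1 < g.length then (pyZipStar g).map firstTruthy else g.headD []

-- A's first loop: the dict maps each name to the index list of its group
theorem pv_fillA_getD (contacts : List (List String)) (c : String) :
    ∀ (l : List Nat) (d : PySem.Dict String (List Nat)),
    (l.foldl (fun d i =>
        let name := pvHead (contacts.getD i [])
        if (d.get? name).isSome then d.modify name [] (fun g => g ++ [i])
        else d.insert name [i]) d).getD c []
      = d.getD c [] ++ l.filter (fun i => pvHead (contacts.getD i []) == c) := by
  have hstep : ∀ (d : PySem.Dict String (List Nat)) (i : Nat),
      (if (d.get? (pvHead (contacts.getD i []))).isSome then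
        d.modify (pvHead (contacts.getD i [])) [] (fun g => g ++ [i])
       else d.insert (pvHead (contacts.getD i [])) [i]).getD c []
      = d.getD c [] ++ (if pvHead (contacts.getD i []) == c then [i] else []) := by
    intro d i
    by_cases hs : ((d.get? (pvHead (contacts.getD i []))).isSome : Prop)
    · rw [if_pos hs, PySem.Dict.getD_modify]
      by_cases hcn : c = pvHead (contacts.getD i [])
      · rw [if_pos hcn, if_pos (by simp [hcn]), hcn]
      · rw [if_neg hcn, if_neg (fun h => hcn (beq_iff_eq.mp h).symm), List.append_nil]
    · have hnone : d.get? (pvHead (contacts.getD i [])) = none :=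
        Option.not_isSome_iff_eq_none.mp hs
      rw [if_neg hs, PySem.Dict.getD_insert]
      by_cases hcn : c = pvHead (contacts.getD i [])
      · rw [if_pos hcn, if_pos (by simp [hcn]), hcn,
          PySem.Dict.getD_of_get?_eq_none d [] hnone, List.nil_append]
      · rw [if_neg hcn, if_neg (fun h => hcn (beq_iff_eq.mp h).symm), List.append_nil]
  intro l
  induction l with
  | nil => intro d; simp
  | cons i l ih =>
    intro d
    simp only [List.foldl_cons, List.filter_cons]
    rw [ih, hstep, List.append_assoc]
    congr 1
    cases hik : (pvHead (contacts.getD i []) == c) <;> simp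

-- reading a group back through its index list gives the filtered sublist
theorem pv_filter_range (p : List String → Bool) :
    ∀ (l : List (List String)),
    ((List.range l.length).filter (fun i => p (l.getD i []))).map (fun i => l.getD i [])
      = l.filter p := by
  intro l
  induction l with
  | nil => simp
  | cons x l ih =>
    have hmap : (List.map Nat.succ (List.range l.length)).filter
          (fun i => p ((x :: l).getD i []))
        = (List.filter (fun i => p (l.getD i [])) (List.range l.length)).map Nat.succ := by
      rw [List.filter_map]; rfl
    have htail : (((List.range l.length).filter (fun i => p (l.getD i []))).map Nat.succ).map
          (fun i => (x :: l).getD i []) = l.filter p := by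
      rw [List.map_map, ← ih]
      exact List.map_congr_left (fun a _ => rfl)
    rw [List.length_cons, List.range_succ_eq_map, List.filter_cons]
    by_cases hx : p x = true
    · rw [if_pos (by simpa using hx), List.map_cons, hmap, htail, List.getD_cons_zero,
        List.filter_cons_of_pos hx]
    · rw [if_neg (by simpa using hx), hmap, htail, List.filter_cons_of_neg (by simpa using hx)]

-- the heads listed by index equal the heads listed by element
theorem pv_map_range (l : List (List String)) :
    (List.range l.length).map (fun i => pvHead (l.getD i [])) = l.map pvHead := by
  induction l with
  | nil => simp
  | cons x l ih =>
    rw [List.length_cons, List.range_succ_eq_map, List.map_cons, List.map_map, List.map_cons]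
    refine congrArg₂ List.cons rfl ?_
    rw [← ih]
    exact List.map_congr_left (fun a _ => rfl)

theorem pv_two_mem_length {α : Type} {l : List α} {a b : α} (ha : a ∈ l) (hb : b ∈ l)
    (hne : a ≠ b) : 1 < l.length := by
  cases l with
  | nil => cases ha
  | cons x t =>
    cases t with
    | nil =>
      simp only [List.mem_singleton] at ha hb
      exact absurd (ha.trans hb.symm) hne
    | cons y u => simp only [List.length_cons]; omega

theorem pv_singleton {α : Type} {l : List α} {a : α} (h : l.length = 1) (ha : a ∈ l) :
    l = [a] := by
  cases l with
  | nil => cases ha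
  | cons x t =>
    cases t with
    | nil =>
      simp only [List.mem_singleton] at ha
      rw [ha]
    | cons y u => simp at h

-- PySem.Set.ofList over a snoc
theorem pv_ofList_append (s : List String) (x : String) :
    PySem.Set.ofList (s ++ [x]) = PySem.Set.add (PySem.Set.ofList s) x := by
  rw [PySem.Set.ofList_eq_foldl, PySem.Set.ofList_eq_foldl, List.foldl_append]
  rfl

theorem pv_add_of_mem (s : PySem.Set String) (x : String) (h : x ∈ s) :
    PySem.Set.add s x = s := by
  simp [PySem.Set.add, PySem.Set.contains, h]

theorem pv_add_of_not_mem (s : PySem.Set String) (x : String) (h : x ∉ s) :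
    PySem.Set.add s x = s ++ [x] := by
  simp [PySem.Set.add, PySem.Set.contains, h]

-- A's second loop invariant: after k steps the output lists one record per distinct
-- name seen so far, and the dict slot of a name is emptied once its (multi-)group is emitted
theorem pv_loop2 (contacts : List (List String))
    (d0 : PySem.Dict String (List Nat))
    (h0 : ∀ name, d0.getD name [] = pvI contacts name) :
    ∀ k, k ≤ contacts.length →
    (∀ name,
      ((List.range k).foldl
        (fun st i =>
          let name := pvHead (contacts.getD i [])
          let g := st.1.getD name []
          if 1 < g.length then
            (st.1.insert name [],
             st.2 ++ [(pyZipStar (g.map (fun j => contacts.getD j []))).map firstTruthy])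
          else if g.length = 1 then (st.1, st.2 ++ [contacts.getD i []])
          else st)
        (d0, ([] : List (List String)))).1.getD name []
      = if name ∈ (List.range k).map (pvHd contacts) ∧ 1 < (pvI contacts name).length
        then [] else pvI contacts name)
    ∧ ((List.range k).foldl
        (fun st i =>
          let name := pvHead (contacts.getD i [])
          let g := st.1.getD name []
          if 1 < g.length then
            (st.1.insert name [],
             st.2 ++ [(pyZipStar (g.map (fun j => contacts.getD j []))).map firstTruthy])
          else if g.length = 1 then (st.1, st.2 ++ [contacts.getD i []])
          else st)
        (d0, ([] : List (List String)))).2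
      = (PySem.Set.ofList ((List.range k).map (pvHd contacts))).map
          (fun nm => pvRec ((pvI contacts nm).map (fun j => contacts.getD j []))) := by
  intro k
  induction k with
  | zero =>
    intro _
    refine ⟨fun name => ?_, ?_⟩
    · simpa using h0 name
    · simp [PySem.Set.ofList]
  | succ k ih =>
    intro hk1
    have hk : k ≤ contacts.length := Nat.le_of_succ_le hk1
    obtain ⟨ih1, ih2⟩ := ih hk
    rw [List.range_succ, List.foldl_append, List.foldl_cons, List.foldl_nil]
    set st := List.foldl
      (fun st i =>
          let name := pvHead (contacts.getD i [])
          let g := st.1.getD name []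
          if 1 < g.length then
            (st.1.insert name [],
             st.2 ++ [(pyZipStar (g.map (fun j => contacts.getD j []))).map firstTruthy])
          else if g.length = 1 then (st.1, st.2 ++ [contacts.getD i []])
          else st)
      (d0, ([] : List (List String))) (List.range k) with hst
    have hnm : pvHd contacts k = pvHead (contacts.getD k []) := rfl
    have hkI : k ∈ pvI contacts (pvHd contacts k) := by
      simp only [pvI, List.mem_filter, List.mem_range]
      exact ⟨Nat.lt_of_succ_le hk1, by simp⟩
    have hseen : ∀ name, name ∈ List.map (pvHd contacts) (List.range k ++ [k])
        ↔ name ∈ List.map (pvHd contacts) (List.range k) ∨ name = pvHd contacts k := by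
      intro name
      rw [List.map_append]
      simp [eq_comm]
    by_cases hmem : pvHd contacts k ∈ List.map (pvHd contacts) (List.range k)
    · -- name seen before: its group has > 1 members, its dict slot is [], the step skips
      have h2 : 1 < (pvI contacts (pvHd contacts k)).length := by
        obtain ⟨j, hj, hjeq⟩ := by simpa using hmem
        have hjI : j ∈ pvI contacts (pvHd contacts k) := by
          simp only [pvI, List.mem_filter, List.mem_range]
          exact ⟨by omega, by simp [hjeq]⟩
        exact pv_two_mem_length hjI hkI (by omega)
      have hg : st.1.getD (pvHead (contacts.getD k [])) [] = [] := by
        rw [← hnm, ih1 (pvHd contacts k)]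
        simp [hmem, h2]
      have hfa : ((1:Nat) < 0) = False := by simp
      have hfb : ((0:Nat) = 1) = False := by simp
      simp only [hg, List.length_nil, hfa, hfb, if_false]
      refine ⟨fun name => ?_, ?_⟩
      · rw [ih1 name]
        by_cases hne : name = pvHd contacts k
        · rw [hne, if_pos ⟨hmem, h2⟩, if_pos ⟨(hseen (pvHd contacts k)).mpr (Or.inl hmem), h2⟩]
        · have hiff : (name ∈ List.map (pvHd contacts) (List.range k ++ [k]))
              = (name ∈ List.map (pvHd contacts) (List.range k)) := by
            rw [hseen]
            simp [hne]
          simp only [hiff]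
      · rw [ih2, List.map_append, List.map_singleton, pv_ofList_append,
          pv_add_of_mem _ _ ((PySem.Set.mem_ofList _ _).mpr hmem)]
    · -- first occurrence of the name
      have hg : st.1.getD (pvHead (contacts.getD k [])) [] = pvI contacts (pvHd contacts k) := by
        rw [← hnm, ih1 (pvHd contacts k)]
        simp [hmem]
      have hpos : 0 < (pvI contacts (pvHd contacts k)).length := List.length_pos_of_mem hkI
      rcases Nat.lt_or_ge 1 (pvI contacts (pvHd contacts k)).length with h2 | h2
      · -- group of size > 1: merge now, empty the slot
        have hca : (1 < (pvI contacts (pvHd contacts k)).length) = True := eq_true h2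
        simp only [hg, hca, if_true]
        refine ⟨fun name => ?_, ?_⟩
        · rw [PySem.Dict.getD_insert]
          by_cases hne : name = pvHead (contacts.getD k [])
          · rw [if_pos hne, if_pos]
            refine ⟨(hseen name).mpr (Or.inr hne), ?_⟩
            rw [hne]
            exact h2
          · have hne' : ¬ name = pvHd contacts k := fun h => hne (h.trans hnm)
            rw [if_neg hne, ih1 name]
            have hiff : (name ∈ List.map (pvHd contacts) (List.range k ++ [k]))
                = (name ∈ List.map (pvHd contacts) (List.range k)) := by
              rw [hseen]
              simp [hne']
            simp only [hiff]
        · rw [ih2, List.map_append, List.map_singleton, pv_ofList_append,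
            pv_add_of_not_mem _ _ (fun hc => hmem ((PySem.Set.mem_ofList _ _).mp hc)),
            List.map_append, List.map_singleton]
          refine congrArg₂ _ rfl ?_
          rw [pvRec, if_pos (by simpa using h2)]
      · -- singleton group: emit the contact unchanged, slot untouched
        have h1 : (pvI contacts (pvHd contacts k)).length = 1 := by omega
        have hIk : pvI contacts (pvHd contacts k) = [k] := pv_singleton h1 hkI
        have hca : (1 < (pvI contacts (pvHd contacts k)).length) = False := by simp [h1]
        have hcb : ((pvI contacts (pvHd contacts k)).length = 1) = True := eq_true h1
        simp only [hg, hca, hcb, if_false, if_true]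
        refine ⟨fun name => ?_, ?_⟩
        · rw [ih1 name]
          by_cases hne : name = pvHd contacts k
          · rw [if_neg, if_neg]
            · rw [hne, hca]
              simp
            · rw [hne, hca]
              simp
          · have hiff : (name ∈ List.map (pvHd contacts) (List.range k ++ [k]))
                = (name ∈ List.map (pvHd contacts) (List.range k)) := by
              rw [hseen]
              simp [hne]
            simp only [hiff]
        · rw [ih2, List.map_append, List.map_singleton, pv_ofList_append,
            pv_add_of_not_mem _ _ (fun hc => hmem ((PySem.Set.mem_ofList _ _).mp hc)),
            List.map_append, List.map_singleton]
          refine congrArg₂ _ rfl ?_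
          rw [pvRec, hIk]
          simp

-- A computed through the group characterization
theorem pv_A_eq (contacts : List (List String)) :
    merge_duplicates contacts
      = (PySem.Set.ofList (contacts.map pvHead)).map
          (fun nm => pvRec ((pvI contacts nm).map (fun j => contacts.getD j []))) := by
  have h0 : ∀ name,
      ((List.range contacts.length).foldl
        (fun d i =>
          let name := pvHead (contacts.getD i [])
          if (d.get? name).isSome then d.modify name [] (fun g => g ++ [i])
          else d.insert name [i]) PySem.Dict.empty).getD name []
        = pvI contacts name := by
    intro name
    rw [pv_fillA_getD]
    simp [pvI, pvHd]
  have := (pv_loop2 contacts _ h0 contacts.length le_rfl).2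
  rw [merge_duplicates]
  rw [this]
  congr 1
  refine congrArg _ ?_
  exact pv_map_range contacts

-- ----- B-side lemmas -----

-- firstTruthy of a singleton column is the entry itself
theorem pv_firstTruthy_single (d : String) : firstTruthy [d] = d := by
  by_cases h : d = "" <;> simp [firstTruthy, h]

-- firstTruthy absorbs the pairwise merge of the first two entries
theorem pv_firstTruthy_merge (a b : String) (t : List String) :
    firstTruthy ((if a ≠ "" then a else b) :: t) = firstTruthy (a :: b :: t) := by
  by_cases h : a = "" <;> simp [firstTruthy, h]

theorem pv_foldl_min_le (rs : List (List String)) :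
    ∀ x : Nat, rs.foldl (fun m l => min m l.length) x ≤ x := by
  induction rs with
  | nil => intro x; simp
  | cons c rs ih =>
    intro x
    exact le_trans (ih (min x c.length)) (Nat.min_le_left _ _)

-- a row read back column by column is itself
theorem pv_row_eq (r : List String) :
    (List.range r.length).map (fun k => r.getD k "") = r := by
  induction r with
  | nil => simp
  | cons x r ih =>
    rw [List.length_cons, List.range_succ_eq_map, List.map_cons, List.map_map]
    refine congrArg₂ List.cons rfl ?_
    calc (List.range r.length).map ((fun k => (x :: r).getD k "") ∘ Nat.succ)
        = (List.range r.length).map (fun k => r.getD k "") :=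
          List.map_congr_left (fun a _ => rfl)
      _ = r := ih

-- zip(*[x]) merged back is x itself
theorem pv_zip_single (x : List String) : (pyZipStar [x]).map firstTruthy = x := by
  rw [pyZipStar, List.foldl_nil, List.map_map]
  calc (List.range x.length).map (firstTruthy ∘ fun k => [x].map (fun l => l.getD k ""))
      = (List.range x.length).map (fun k => x.getD k "") :=
        List.map_congr_left (fun k _ => by simp [Function.comp, pv_firstTruthy_single])
    _ = x := pv_row_eq x

-- entries of a pairwise merge, inside the common length
theorem pv_mergeTwo_getD (r c : List String) (k : Nat) (hk : k < min r.length c.length) :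
    (mergeTwo r c).getD k "" = if r.getD k "" ≠ "" then r.getD k "" else c.getD k "" := by
  have hr : k < r.length := lt_of_lt_of_le hk (Nat.min_le_left _ _)
  have hc : k < c.length := lt_of_lt_of_le hk (Nat.min_le_right _ _)
  have hz : k < (r.zip c).length := by rw [List.length_zip]; exact hk
  have hm : k < (mergeTwo r c).length := by
    simpa [mergeTwo, List.length_zip] using hk
  rw [List.getD_eq_getElem _ _ hm, List.getD_eq_getElem _ _ hr, List.getD_eq_getElem _ _ hc]
  simp [mergeTwo]

-- merging one more row into the running record = prepending it to the zip
theorem pv_merge_step (r0 c : List String) (rs : List (List String)) :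
    (pyZipStar (mergeTwo r0 c :: rs)).map firstTruthy
      = (pyZipStar (r0 :: c :: rs)).map firstTruthy := by
  have hlen : (mergeTwo r0 c).length = min r0.length c.length := by
    simp [mergeTwo, List.length_zip]
  have hm : rs.foldl (fun m l => min m l.length) (mergeTwo r0 c).length
      = (c :: rs).foldl (fun m l => min m l.length) r0.length := by
    rw [hlen]; rfl
  rw [pyZipStar, pyZipStar, hm, List.map_map, List.map_map]
  refine List.map_congr_left (fun k hk => ?_)
  have hkm : k < rs.foldl (fun m l => min m l.length) (min r0.length c.length) :=
    List.mem_range.mp hk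
  have hkmin : k < min r0.length c.length :=
    lt_of_lt_of_le hkm (pv_foldl_min_le rs _)
  simp only [Function.comp, List.map_cons]
  rw [pv_mergeTwo_getD r0 c k hkmin, pv_firstTruthy_merge]

-- the incremental fold computes exactly A's column-wise merged record
theorem pv_foldl_mergeTwo (rs : List (List String)) :
    ∀ r0, rs.foldl mergeTwo r0 = (pyZipStar (r0 :: rs)).map firstTruthy := by
  induction rs with
  | nil =>
    intro r0
    rw [List.foldl_nil]
    exact (pv_zip_single r0).symm
  | cons c rs ih =>
    intro r0
    rw [List.foldl_cons, ih (mergeTwo r0 c), pv_merge_step]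

-- the fold over a nonempty group is the record A emits for it
theorem pv_foldl_eq_pvRec (x : List String) (xs : List (List String)) :
    xs.foldl mergeTwo x = pvRec (x :: xs) := by
  rw [pv_foldl_mergeTwo, pvRec]
  cases xs with
  | nil =>
    rw [if_neg (by simp), pv_zip_single]
    rfl
  | cons y ys =>
    rw [if_pos (by simp)]

-- B's fill loop, observed through get?: the stored value is the running fold over the group
theorem pv_fillB_get? (name : String) :
    ∀ (l : List (List String)) (d : PySem.Dict String (List String)),
    (l.foldl (fun d c => d.insert (pvHead c) (pvStep d c)) d).get? name
    = (l.filter (fun c => pvHead c == name)).foldl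
        (fun o c => some (match o with | some r => mergeTwo r c | none => c))
        (d.get? name) := by
  intro l
  induction l with
  | nil => intro d; simp
  | cons c l ih =>
    intro d
    simp only [List.foldl_cons, List.filter_cons]
    rw [ih]
    by_cases h : pvHead c = name
    · rw [if_pos (by simp [h]), List.foldl_cons, ← h, PySem.Dict.get?_insert_self]
      simp [pvStep, h]
    · rw [if_neg (by simp [h]), PySem.Dict.get?_insert_of_ne _ _ (fun hh => h hh.symm)]

-- stepping the Option fold from a present record is the plain fold
theorem pv_optFold_some (g : List (List String)) :
    ∀ r, g.foldl (fun o c => some (match o with | some r => mergeTwo r c | none => c))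
        (some r) = some (g.foldl mergeTwo r) := by
  induction g with
  | nil => intro r; simp
  | cons c g ih => intro r; simpa using ih (mergeTwo r c)

-- B computed through the group characterization
theorem pv_B_eq (contacts : List (List String)) :
    merge_duplicates_alt contacts
      = (PySem.Set.ofList (contacts.map pvHead)).map
          (fun nm => pvRec (contacts.filter (fun c => pvHead c == nm))) := by
  rw [merge_duplicates_alt]
  have hkeys : (contacts.foldl
      (fun d c => d.insert (pvHead c) (pvStep d c)) PySem.Dict.empty).keys
      = PySem.Set.ofList (contacts.map pvHead) := by
    rw [PySem.Dict.keys_foldl_insert_key contacts pvHead pvStep PySem.Dict.empty]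
    rfl
  have hnodup : (contacts.foldl
      (fun d c => d.insert (pvHead c) (pvStep d c)) PySem.Dict.empty).keys.Nodup :=
    PySem.Dict.nodup_keys_foldl_insert_key contacts pvHead pvStep PySem.Dict.empty (by simp)
  rw [PySem.Dict.values_eq_map_keys _ hnodup [], hkeys]
  refine List.map_congr_left (fun nm hnm => ?_)
  rw [PySem.Dict.getD_eq_get?_getD, pv_fillB_get?]
  have hne : contacts.filter (fun c => pvHead c == nm) ≠ [] := by
    have hmem : nm ∈ contacts.map pvHead := (PySem.Set.mem_ofList _ _).mp hnm
    obtain ⟨c, hc, hceq⟩ := List.mem_map.mp hmem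
    intro hnil
    have : c ∈ contacts.filter (fun c => pvHead c == nm) :=
      List.mem_filter.mpr ⟨hc, by simp [hceq]⟩
    rw [hnil] at this
    cases this
  cases hg : contacts.filter (fun c => pvHead c == nm) with
  | nil => exact absurd hg hne
  | cons x xs =>
    rw [PySem.Dict.get?_empty, List.foldl_cons]
    simp only []
    rw [pv_optFold_some, Option.getD_some, pv_foldl_eq_pvRec]

-- ===== VERDICT (by name: the statement is the Claim_ definition above) =====
theorem merge_duplicates_spec : Claim_equal_merge_duplicates := by
  intro contacts _ _
  unfold Spec_merge_duplicates
  rw [pv_A_eq, pv_B_eq]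
  refine List.map_congr_left (fun nm _ => ?_)
  congr 1
  have := pv_filter_range (fun c => pvHead c == nm) contacts
  rw [← this]
  simp [pvI, pvHd]
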